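-- pv_equiv track=rewrite | github.com/woojj5/baekjoon_python | 프로그래머스/1/258712. 가장 많이 받은 선물/가장 많이 받은 선물.py | solution
-- ===== SOURCE A (Python) =====
-- def solution(friends, gifts):
--     answer = 0
--     giftdict = {k:{j:0 for j in friends if j!= k} for k in friends}
--     gives = {k:0 for k in friends}
--     gets = {k:0 for k in friends}
--     for item in gifts:
--         send, receive = item.split(" ")
--         giftdict[send][receive] +=1
--         gives[send]+=1
--         gets[receive]+=1
--     ans = 0
--     for k,v in giftdict.items():
--         cnt = 0
--         for kk,vv in giftdict[k].items():
--             if giftdict[k][kk] > giftdict[kk][k]: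
--                 cnt+=1
--             elif giftdict[k][kk] == giftdict[kk][k]:
--                 if gives[k] - gets[k] > gives[kk] - gets[kk]:
--                     cnt+=1
--         ans = max(ans, cnt)
--
--
--     return ans
-- ===== SOURCE B (Python) =====
-- def solution(friends, gifts):
--     # Baseline-and-correction: give every friend a baseline score = number of
--     # friends with a strictly smaller net gift balance (the tie-rule outcome for
--     # every pair), then patch only the pairs whose exchanged-gift counts are
--     # unequal, by a single pass over a flat (sender, receiver) pair counter.
--     count = {}
--     net = {}
--     for g in gifts:
--         s, r = g.split(" ")
--         count[(s, r)] = count.get((s, r), 0) + 1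
--         net[s] = net.get(s, 0) + 1
--         net[r] = net.get(r, 0) - 1
--     names = list(dict.fromkeys(friends))
--     wins = {a: sum(1 for b in names if net.get(b, 0) < net.get(a, 0)) for a in names}
--     for (a, b), ab in count.items():
--         ba = count.get((b, a), 0)
--         if ab > ba:
--             # gift counts decide this pair (handled once, at its larger key):
--             # a earns the point, and the baseline's net-balance credit for the
--             # pair, if any, is taken back.
--             wins[a] += 1
--             na, nb = net.get(a, 0), net.get(b, 0)
--             if na > nb:
--                 wins[a] -= 1
--             elif nb > na:
--                 wins[b] -= 1
--     return max(wins.values(), default=0)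
-- ===== Notes on version B (the rewrite author's own statement) =====
-- stated objective: alternative
-- what changed: Replaces A's pairwise head-to-head tournament (nested n x n scan comparing gift counts with a net-balance tiebreak per pair) by a baseline-and-correction scheme: every friend's score starts as the number of friends with a strictly smaller net balance, and a single pass over a flat (sender,receiver) pair counter patches only the pairs whose exchanged-gift counts are unequal (+1 to the gift winner, -1 returned by whoever the net baseline had credited).
import Mathlib
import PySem

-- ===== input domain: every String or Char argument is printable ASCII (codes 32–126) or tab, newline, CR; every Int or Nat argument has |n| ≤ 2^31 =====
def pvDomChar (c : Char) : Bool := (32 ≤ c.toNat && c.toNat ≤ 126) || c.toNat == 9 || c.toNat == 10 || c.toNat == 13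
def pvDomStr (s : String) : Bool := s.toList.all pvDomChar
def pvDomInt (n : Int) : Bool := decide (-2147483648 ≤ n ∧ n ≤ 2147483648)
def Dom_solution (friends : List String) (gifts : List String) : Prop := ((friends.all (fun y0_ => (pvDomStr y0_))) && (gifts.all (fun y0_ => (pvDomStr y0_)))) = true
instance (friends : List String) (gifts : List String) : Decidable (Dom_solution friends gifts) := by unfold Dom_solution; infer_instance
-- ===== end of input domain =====

-- B replaces A's pairwise head-to-head tournament by a baseline-and-correction scheme:
-- baseline score = number of friends with a strictly smaller net balance, then one pass
-- over a flat (sender, receiver) pair counter patches the unequal pairs (objective: alternative).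

-- ===== PORT A =====
-- {j:0 for j in friends if j != k}
def innerInit (friends : List String) (k : String) : PySem.Dict String Int :=
  friends.foldl (fun d2 j => if j ≠ k then d2.insert j 0 else d2) PySem.Dict.empty

-- {k:{j:0 for j in friends if j != k} for k in friends}
def giftInit (friends : List String) : PySem.Dict String (PySem.Dict String Int) :=
  friends.foldl (fun d k => d.insert k (innerInit friends k)) PySem.Dict.empty

-- {k:0 for k in friends}
def zeroInit (friends : List String) : PySem.Dict String Int :=
  friends.foldl (fun d k => d.insert k 0) PySem.Dict.empty

-- one iteration of A's gift loop (KeyError/ValueError cases are outside Pre_; the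
-- port uses getD there and skips an unsplittable item, both unreachable under Pre_)
def stepA (st : PySem.Dict String (PySem.Dict String Int) × PySem.Dict String Int × PySem.Dict String Int)
    (item : String) :
    PySem.Dict String (PySem.Dict String Int) × PySem.Dict String Int × PySem.Dict String Int :=
  match PySem.Str.split? item " " with
  | some [send, receive] =>
      (st.1.insert send ((st.1.getD send PySem.Dict.empty).insert receive
          ((st.1.getD send PySem.Dict.empty).getD receive 0 + 1)),
       st.2.1.insert send (st.2.1.getD send 0 + 1),
       st.2.2.insert receive (st.2.2.getD receive 0 + 1))
  | _ => st

def solution (friends : List String) (gifts : List String) : Int :=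
  let st := gifts.foldl stepA (giftInit friends, zeroInit friends, zeroInit friends)
  let gd := st.1
  let gives := st.2.1
  let gets := st.2.2
  gd.items.foldl (fun ans kv =>
    let k := kv.1
    let cnt := (gd.getD k PySem.Dict.empty).items.foldl (fun cnt kkvv =>
      let kk := kkvv.1
      if (gd.getD k PySem.Dict.empty).getD kk 0 > (gd.getD kk PySem.Dict.empty).getD k 0 then cnt + 1
      else if (gd.getD k PySem.Dict.empty).getD kk 0 = (gd.getD kk PySem.Dict.empty).getD k 0 then
        (if gives.getD k 0 - gets.getD k 0 > gives.getD kk 0 - gets.getD kk 0 then cnt + 1 else cnt)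
      else cnt) 0
    max ans cnt) 0

-- ===== PORT B =====
-- one iteration of B's build loop over gifts
def stepB (st : PySem.Dict (String × String) Int × PySem.Dict String Int) (g : String) :
    PySem.Dict (String × String) Int × PySem.Dict String Int :=
  match PySem.Str.split? g " " with
  | some [s, r] =>
      let cnt := st.1.insert (s, r) (st.1.getD (s, r) 0 + 1)
      let net := st.2.insert s (st.2.getD s 0 + 1)
      (cnt, net.insert r (net.getD r 0 - 1))
  | _ => st

-- one iteration of B's correction loop over count.items (wins[a] += 1 is a modify with
-- default 0; under Pre_ the key is always present, as in the Python)
def corrStep (count : PySem.Dict (String × String) Int) (net : PySem.Dict String Int)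
    (w : PySem.Dict String Int) (kv : (String × String) × Int) : PySem.Dict String Int :=
  let a := kv.1.1
  let b := kv.1.2
  let ab := kv.2
  let ba := count.getD (b, a) 0
  if ab > ba then
    let w1 := w.modify a 0 (· + 1)
    let na := net.getD a 0
    let nb := net.getD b 0
    if na > nb then w1.modify a 0 (· - 1)
    else if nb > na then w1.modify b 0 (· - 1)
    else w1
  else w

def solution_alt (friends : List String) (gifts : List String) : Int :=
  let st := gifts.foldl stepB (PySem.Dict.empty, PySem.Dict.empty)
  let count := st.1
  let net := st.2
  let names := PySem.List.dedup friends
  let wins0 := names.foldl (fun d a =>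
      d.insert a ((names.countP (fun b => net.getD b 0 < net.getD a 0) : Int))) PySem.Dict.empty
  let wins := count.items.foldl (corrStep count net) wins0
  PySem.List.maxD wins.values (fun x => x) 0

-- ===== PRECONDITION & SPEC =====
-- Pre_ excludes exactly the gifts on which A raises: an item that does not split on a
-- single space into two distinct members of friends (ValueError on unpacking, else
-- KeyError in giftdict / gives / gets).
def Pre_solution (friends : List String) (gifts : List String) : Prop :=
  ∀ g ∈ gifts, ∃ s ∈ friends, ∃ r ∈ friends, s ≠ r ∧ PySem.Str.split? g " " = some [s, r]
instance (friends : List String) (gifts : List String) : Decidable (Pre_solution friends gifts) := by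
  unfold Pre_solution; infer_instance

def pvWitness_solution : List String × List String := (["a", "b"], ["a b"])

def Spec_solution (friends : List String) (gifts : List String) (out : Int) : Prop := out = solution_alt friends gifts
instance (friends : List String) (gifts : List String) (out : Int) : Decidable (Spec_solution friends gifts out) := by unfold Spec_solution; infer_instance

-- ===== CLAIM (what is proved, stated in full; the proofs are below) =====
def Claim_equal_solution : Prop := ∀ (friends : List String) (gifts : List String), Dom_solution friends gifts → Pre_solution friends gifts → Spec_solution friends gifts (solution friends gifts)

-- ===== LEMMAS AND PROOFS =====

-- generic: a fold inserting f k at every key k of l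
theorem getD_foldl_insert_fn {ν : Type} (f : String → ν) (dflt : ν) (l : List String)
    (d : PySem.Dict String ν) (a : String) :
    (l.foldl (fun d k => d.insert k (f k)) d).getD a dflt
      = if a ∈ l then f a else d.getD a dflt := by
  induction l generalizing d with
  | nil => simp
  | cons k t ih =>
      simp only [List.foldl_cons, ih, List.mem_cons]
      rw [PySem.Dict.getD_insert]
      by_cases hat : a ∈ t
      · simp [hat]
      · by_cases hak : a = k <;> simp [hat, hak]

theorem getD_zeroInit (l : List String) (a : String) : (zeroInit l).getD a 0 = 0 := by
  unfold zeroInit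
  rw [getD_foldl_insert_fn (f := fun _ => 0)]
  split <;> simp

theorem innerInit_eq_filter (friends : List String) (k : String) :
    innerInit friends k
      = (friends.filter (fun j => decide (j ≠ k))).foldl (fun d2 j => d2.insert j 0) PySem.Dict.empty := by
  unfold innerInit
  rw [PySem.List.foldl_ite_eq_foldl_filter]

theorem keys_innerInit (friends : List String) (k : String) :
    (innerInit friends k).keys = PySem.Set.ofList (friends.filter (fun j => decide (j ≠ k))) := by
  rw [innerInit_eq_filter, PySem.Dict.keys_foldl_insert]
  rfl

theorem getD_innerInit (friends : List String) (k b : String) :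
    (innerInit friends k).getD b 0 = 0 := by
  rw [innerInit_eq_filter, getD_foldl_insert_fn (f := fun _ => 0)]
  split <;> simp

theorem getD_giftInit (friends : List String) (a : String) :
    (giftInit friends).getD a PySem.Dict.empty
      = if a ∈ friends then innerInit friends a else PySem.Dict.empty := by
  unfold giftInit
  rw [getD_foldl_insert_fn (f := fun k => innerInit friends k)]
  simp

theorem keys_giftInit (friends : List String) :
    (giftInit friends).keys = PySem.Set.ofList friends := by
  unfold giftInit
  rw [PySem.Dict.keys_foldl_insert]
  rfl

theorem getD2_giftInit (friends : List String) (a b : String) :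
    ((giftInit friends).getD a PySem.Dict.empty).getD b 0 = 0 := by
  rw [getD_giftInit]
  split
  · exact getD_innerInit friends a b
  · simp

theorem maxD_map_eq_foldl (l : List String) (f : String → Int) (hf : ∀ a ∈ l, 0 ≤ f a) :
    PySem.List.maxD (l.map f) (fun x => x) 0 = l.foldl (fun m a => max m (f a)) 0 := by
  cases l with
  | nil => rfl
  | cons a t =>
      simp only [List.map_cons, PySem.List.maxD, PySem.List.max?_id_cons, Option.getD_some,
        List.foldl_cons, List.foldl_map]
      have h : max (0 : Int) (f a) = f a := max_eq_right (hf a (by simp))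
      rw [h]

def cAB (gifts : List String) (a b : String) : Int :=
  (gifts.countP (fun g => PySem.Str.split? g " " == some [a, b]) : Int)
def sentBy (gifts : List String) (a : String) : Int :=
  (gifts.countP (fun g => match PySem.Str.split? g " " with | some [s, _] => s == a | _ => false) : Int)
def recvBy (gifts : List String) (a : String) : Int :=
  (gifts.countP (fun g => match PySem.Str.split? g " " with | some [_, r] => r == a | _ => false) : Int)
def netOf (gifts : List String) (a : String) : Int := sentBy gifts a - recvBy gifts a
def beatsB (gifts : List String) (a b : String) : Bool :=
  decide (cAB gifts a b > cAB gifts b a) ||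
    (decide (cAB gifts a b = cAB gifts b a) &&
      decide (sentBy gifts a - recvBy gifts a > sentBy gifts b - recvBy gifts b))

def score (gifts names : List String) (k : String) : Int := (names.countP (beatsB gifts k) : Int)

-- net effect of one correction item on friend k
def delta (gifts : List String) (k : String) (p : String × String) : Int :=
  if cAB gifts p.1 p.2 > cAB gifts p.2 p.1 then
    (if k = p.1 then 1 else 0)
      - (if k = p.1 ∧ netOf gifts p.1 > netOf gifts p.2 then 1 else 0)
      - (if k = p.2 ∧ netOf gifts p.2 > netOf gifts p.1 then 1 else 0)
  else 0

theorem cAB_cons (g : String) (t : List String) (a b : String) :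
    cAB (g :: t) a b
      = (if PySem.Str.split? g " " = some [a, b] then 1 else 0) + cAB t a b := by
  simp only [cAB, List.countP_cons]
  split <;> rename_i h <;> simp_all <;> push_cast <;> ring
theorem sentBy_cons (g : String) (t : List String) (a : String) :
    sentBy (g :: t) a
      = (if (match PySem.Str.split? g " " with | some [s, _] => s == a | _ => false) = true then 1 else 0)
        + sentBy t a := by
  simp only [sentBy, List.countP_cons]
  split <;> push_cast <;> ring
theorem recvBy_cons (g : String) (t : List String) (a : String) :
    recvBy (g :: t) a
      = (if (match PySem.Str.split? g " " with | some [_, r] => r == a | _ => false) = true then 1 else 0)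
        + recvBy t a := by
  simp only [recvBy, List.countP_cons]
  split <;> push_cast <;> ring

theorem cAB_nonneg (gifts : List String) (a b : String) : 0 ≤ cAB gifts a b := by
  unfold cAB; positivity

set_option maxRecDepth 4096 in
theorem loopB_spec (gs : List String) (c : PySem.Dict (String × String) Int) (n : PySem.Dict String Int) :
    (∀ a b, (gs.foldl stepB (c, n)).1.getD (a, b) 0 = c.getD (a, b) 0 + cAB gs a b)
    ∧ (∀ a, (gs.foldl stepB (c, n)).2.getD a 0 = n.getD a 0 + (sentBy gs a - recvBy gs a)) := by
  induction gs generalizing c n with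
  | nil => simp [cAB, sentBy, recvBy]
  | cons g t ih =>
      simp only [List.foldl_cons]
      rcases hsplit : PySem.Str.split? g " " with _ | l
      · simpa [stepB, hsplit, cAB_cons, sentBy_cons, recvBy_cons] using ih c n
      · match l with
        | [] => simpa [stepB, hsplit, cAB_cons, sentBy_cons, recvBy_cons] using ih c n
        | [s] => simpa [stepB, hsplit, cAB_cons, sentBy_cons, recvBy_cons] using ih c n
        | s :: r :: x :: rest => simpa [stepB, hsplit, cAB_cons, sentBy_cons, recvBy_cons] using ih c n
        | [s, r] =>
            simp only [stepB, hsplit]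
            refine ⟨fun a b => ?_, fun a => ?_⟩
            · rw [(ih _ _).1, PySem.Dict.getD_insert, cAB_cons, hsplit]
              simp only [Option.some.injEq, List.cons.injEq, and_true, Prod.mk.injEq, eq_comm]
              clear ih
              split_ifs
              all_goals try omega
              all_goals (rename_i hc; obtain ⟨rfl, rfl⟩ := hc; omega)
            · rw [(ih _ _).2, PySem.Dict.getD_insert, PySem.Dict.getD_insert, PySem.Dict.getD_insert,
                sentBy_cons, recvBy_cons, hsplit]
              simp only [beq_iff_eq, eq_comm]
              clear ih
              split_ifs
              all_goals try omega
              all_goals simp only [Bool.true_eq, beq_iff_eq] at *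
              all_goals subst_vars
              all_goals first | omega | (exact absurd rfl (by assumption))

-- keys of the pair counter: exactly the pairs some gift splits into
set_option maxRecDepth 4096 in
theorem loopB_keys (gs : List String) (c : PySem.Dict (String × String) Int) (n : PySem.Dict String Int)
    (hnd : c.keys.Nodup) :
    (gs.foldl stepB (c, n)).1.keys.Nodup
    ∧ (∀ p : String × String, p ∈ (gs.foldl stepB (c, n)).1.keys
        ↔ p ∈ c.keys ∨ ∃ g ∈ gs, PySem.Str.split? g " " = some [p.1, p.2]) := by
  induction gs generalizing c n with
  | nil => exact ⟨hnd, by simp⟩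
  | cons g t ih =>
      simp only [List.foldl_cons]
      rcases hsplit : PySem.Str.split? g " " with _ | l
      case none =>
        obtain ⟨ih1, ih2⟩ := ih c n hnd
        refine ⟨by simpa [stepB, hsplit] using ih1, fun p => ?_⟩
        simp only [stepB, hsplit]
        rw [ih2 p]
        constructor
        · rintro (h | ⟨g', hg', hs⟩)
          · exact Or.inl h
          · exact Or.inr ⟨g', List.mem_cons_of_mem _ hg', hs⟩
        · rintro (h | ⟨g', hg', hs⟩)
          · exact Or.inl h
          · rcases List.mem_cons.1 hg' with rfl | hg'
            · rw [hsplit] at hs; cases hs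
            · exact Or.inr ⟨g', hg', hs⟩
      case some =>
        match l with
        | [] | [_] | _ :: _ :: _ :: _ =>
            obtain ⟨ih1, ih2⟩ := ih c n hnd
            refine ⟨by simpa [stepB, hsplit] using ih1, fun p => ?_⟩
            simp only [stepB, hsplit]
            rw [ih2 p]
            constructor
            · rintro (h | ⟨g', hg', hs⟩)
              · exact Or.inl h
              · exact Or.inr ⟨g', List.mem_cons_of_mem _ hg', hs⟩
            · rintro (h | ⟨g', hg', hs⟩)
              · exact Or.inl h
              · rcases List.mem_cons.1 hg' with rfl | hg'
                · rw [hsplit] at hs; simp at hs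
                · exact Or.inr ⟨g', hg', hs⟩
        | [s, r] =>
            have hnd' : (c.insert (s, r) (c.getD (s, r) 0 + 1)).keys.Nodup :=
              PySem.Dict.nodup_keys_insert _ _ _ hnd
            obtain ⟨ih1, ih2⟩ := ih (c.insert (s, r) (c.getD (s, r) 0 + 1)) _ hnd'
            refine ⟨by simpa [stepB, hsplit] using ih1, fun p => ?_⟩
            simp only [stepB, hsplit]
            rw [ih2 p, PySem.Dict.mem_keys_insert]
            constructor
            · rintro ((rfl | h) | ⟨g', hg', hs⟩)
              · exact Or.inr ⟨g, List.mem_cons_self, by rw [hsplit]⟩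
              · exact Or.inl h
              · exact Or.inr ⟨g', List.mem_cons_of_mem _ hg', hs⟩
            · rintro (h | ⟨g', hg', hs⟩)
              · exact Or.inl (Or.inr h)
              · rcases List.mem_cons.1 hg' with rfl | hg'
                · rw [hsplit] at hs
                  obtain ⟨p1, p2⟩ := p
                  simp only [Option.some.injEq, List.cons.injEq, and_true] at hs
                  exact Or.inl (Or.inl (by simp [hs.1.symm, hs.2.symm]))
                · exact Or.inr ⟨g', hg', hs⟩

theorem beatsB_irrefl (gifts : List String) (a : String) : beatsB gifts a a = false := by
  simp [beatsB]

-- one correction step changes k's tally by delta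
theorem corrStep_getD (gifts : List String) (count : PySem.Dict (String × String) Int)
    (net : PySem.Dict String Int)
    (hc : ∀ a b, count.getD (a, b) 0 = cAB gifts a b)
    (hn : ∀ a, net.getD a 0 = netOf gifts a)
    (w : PySem.Dict String Int) (kv : (String × String) × Int)
    (hv : kv.2 = cAB gifts kv.1.1 kv.1.2) (k : String) :
    (corrStep count net w kv).getD k 0 = w.getD k 0 + delta gifts k kv.1 := by
  obtain ⟨⟨a, b⟩, v⟩ := kv
  simp only at hv
  unfold corrStep delta
  dsimp only
  rw [hv, hc b a, hn a, hn b]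
  by_cases hcond : cAB gifts a b > cAB gifts b a
  · rw [if_pos hcond, if_pos hcond]
    split_ifs <;> simp only [PySem.Dict.getD_modify] <;> split_ifs <;> simp_all <;> omega
  · rw [if_neg hcond, if_neg hcond]
    omega

theorem corrFold_getD (gifts : List String) (count : PySem.Dict (String × String) Int)
    (net : PySem.Dict String Int)
    (hc : ∀ a b, count.getD (a, b) 0 = cAB gifts a b)
    (hn : ∀ a, net.getD a 0 = netOf gifts a)
    (l : List ((String × String) × Int))
    (hv : ∀ kv ∈ l, kv.2 = cAB gifts kv.1.1 kv.1.2)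
    (w : PySem.Dict String Int) (k : String) :
    (l.foldl (corrStep count net) w).getD k 0
      = w.getD k 0 + (l.map (fun kv => delta gifts k kv.1)).sum := by
  induction l generalizing w with
  | nil => simp
  | cons kv t ih =>
      rw [List.foldl_cons, ih (fun x hx => hv x (List.mem_cons_of_mem _ hx)),
        corrStep_getD gifts count net hc hn w kv (hv kv List.mem_cons_self) k]
      simp
      ring

theorem corrStep_keys (count : PySem.Dict (String × String) Int) (net : PySem.Dict String Int)
    (w : PySem.Dict String Int) (kv : (String × String) × Int)
    (h1 : kv.1.1 ∈ w.keys) (h2 : kv.1.2 ∈ w.keys) :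
    (corrStep count net w kv).keys = w.keys := by
  have key : ∀ (t : String) (f : Int → Int) (d : PySem.Dict String Int),
      t ∈ d.keys → (d.modify t 0 f).keys = d.keys := by
    intro t f d ht
    rw [PySem.Dict.keys_modify, PySem.Dict.keys_insert_of_contains]
    exact (PySem.Dict.contains_iff_mem_keys d t).2 ht
  unfold corrStep
  dsimp only
  have k1 : (w.modify kv.1.1 0 (· + 1)).keys = w.keys := key _ _ _ h1
  split_ifs
  · rw [key _ _ _ (k1 ▸ h1), k1]
  · rw [key _ _ _ (k1 ▸ h2), k1]
  · exact k1
  · rfl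

theorem corrFold_keys (count : PySem.Dict (String × String) Int) (net : PySem.Dict String Int)
    (l : List ((String × String) × Int)) (w : PySem.Dict String Int)
    (h : ∀ kv ∈ l, kv.1.1 ∈ w.keys ∧ kv.1.2 ∈ w.keys) :
    (l.foldl (corrStep count net) w).keys = w.keys := by
  induction l generalizing w with
  | nil => rfl
  | cons kv t ih =>
      rw [List.foldl_cons]
      have hk := corrStep_keys count net w kv (h kv List.mem_cons_self).1 (h kv List.mem_cons_self).2
      rw [ih _ (fun x hx => hk ▸ h x (List.mem_cons_of_mem _ hx)), hk]

-- generic sum lemmas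
theorem sum_single {α : Type} [DecidableEq α] (l : List α) (f : α → Int) (k : α)
    (hl : l.Nodup) (hk : k ∈ l) (hz : ∀ x ∈ l, x ≠ k → f x = 0) :
    (l.map f).sum = f k := by
  induction l with
  | nil => cases hk
  | cons a t ih =>
      by_cases hak : a = k
      · subst hak
        have hzt : (t.map f).sum = 0 := by
          apply List.sum_eq_zero
          intro y hy
          obtain ⟨x, hx, rfl⟩ := List.mem_map.1 hy
          exact hz x (List.mem_cons_of_mem _ hx) (fun h => (List.nodup_cons.1 hl).1 (h ▸ hx))
        simp [hzt]
      · have hkt : k ∈ t := (List.mem_cons.1 hk).resolve_left (fun h => hak h.symm)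
        rw [List.map_cons, List.sum_cons, hz a List.mem_cons_self hak,
          ih (List.nodup_cons.1 hl).2 hkt (fun x hx => hz x (List.mem_cons_of_mem _ hx))]
        ring

theorem sum_superset {α : Type} [DecidableEq α] (l₁ l₂ : List α) (f : α → Int)
    (h₁ : l₁.Nodup) (h₂ : l₂.Nodup) (hsub : ∀ x ∈ l₁, x ∈ l₂)
    (hz : ∀ x ∈ l₂, x ∉ l₁ → f x = 0) :
    (l₁.map f).sum = (l₂.map f).sum := by
  have hperm : l₂.Perm (l₁ ++ l₂.filter (fun x => decide (x ∉ l₁))) := by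
    apply (List.perm_ext_iff_of_nodup h₂ ?_).2
    · intro x
      simp only [List.mem_append, List.mem_filter, decide_eq_true_eq]
      constructor
      · intro hx
        by_cases hx1 : x ∈ l₁
        · exact Or.inl hx1
        · exact Or.inr ⟨hx, hx1⟩
      · rintro (hx | ⟨hx, -⟩)
        · exact hsub x hx
        · exact hx
    · apply List.Nodup.append h₁ (h₂.filter _)
      intro x hx1 hx2
      have h2' := (List.mem_filter.1 hx2).2
      simp only [decide_eq_true_eq] at h2'
      exact h2' hx1
  rw [(hperm.map f).sum_eq, List.map_append, List.sum_append]
  have hzf : ((l₂.filter (fun x => decide (x ∉ l₁))).map f).sum = 0 := by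
    apply List.sum_eq_zero
    intro y hy
    obtain ⟨x, hx, rfl⟩ := List.mem_map.1 hy
    have h2' := (List.mem_filter.1 hx).2
    simp only [decide_eq_true_eq] at h2'
    exact hz x (List.mem_filter.1 hx).1 h2'
  omega

theorem mem_pairs {α : Type} (outer inner : List α) (p : α × α) :
    p ∈ outer.flatMap (fun a => inner.map (fun b => (a, b))) ↔ p.1 ∈ outer ∧ p.2 ∈ inner := by
  obtain ⟨x, y⟩ := p
  simp only [List.mem_flatMap, List.mem_map, Prod.mk.injEq]
  constructor
  · rintro ⟨a, ha, b, hb, rfl, rfl⟩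
    exact ⟨ha, hb⟩
  · rintro ⟨hx, hy⟩
    exact ⟨x, hx, y, hy, rfl, rfl⟩

theorem nodup_pairs {α : Type} [DecidableEq α] (outer inner : List α)
    (ho : outer.Nodup) (hi : inner.Nodup) :
    (outer.flatMap (fun a => inner.map (fun b => (a, b)))).Nodup := by
  induction outer with
  | nil => simp
  | cons a t ih =>
      rw [List.flatMap_cons]
      apply List.Nodup.append
      · exact hi.map (fun b c h => by injection h)
      · exact ih (List.nodup_cons.1 ho).2
      · intro p hp1 hp2
        obtain ⟨b, -, rfl⟩ := List.mem_map.1 hp1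
        have := (mem_pairs t inner (a, b)).1 hp2
        exact (List.nodup_cons.1 ho).1 this.1

theorem sum_pairs {α : Type} (outer inner : List α) (f : α × α → Int) :
    ((outer.flatMap (fun a => inner.map (fun b => (a, b)))).map f).sum
      = (outer.map (fun a => ((inner.map (fun b => f (a, b))).sum))).sum := by
  induction outer with
  | nil => simp
  | cons a t ih =>
      rw [List.flatMap_cons, List.map_append, List.sum_append, ih, List.map_cons, List.sum_cons,
        List.map_map]
      rfl

-- pointwise facts about delta
theorem delta_vanish_notmem (gifts : List String) (k : String) (p : String × String)
    (h : cAB gifts p.1 p.2 = 0) : delta gifts k p = 0 := by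
  have := cAB_nonneg gifts p.2 p.1
  unfold delta
  rw [if_neg (by omega)]

theorem delta_self_left (gifts : List String) (k b : String) :
    delta gifts k (k, b)
      = if cAB gifts k b > cAB gifts b k then 1 - (if netOf gifts k > netOf gifts b then 1 else 0) else 0 := by
  unfold delta
  dsimp only
  split_ifs <;> simp_all <;> omega

theorem delta_vanish_other (gifts : List String) (k a b : String) (hak : a ≠ k) (hbk : b ≠ k) :
    delta gifts k (a, b) = 0 := by
  unfold delta
  dsimp only
  have h1 : ¬ k = a := fun h => hak h.symm
  have h2 : ¬ k = b := fun h => hbk h.symm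
  split_ifs <;> simp_all

theorem delta_at_right (gifts : List String) (k a : String) (hak : a ≠ k) :
    delta gifts k (a, k)
      = -(if cAB gifts a k > cAB gifts k a ∧ netOf gifts k > netOf gifts a then 1 else 0) := by
  unfold delta
  dsimp only
  have h1 : ¬ k = a := fun h => hak h.symm
  split_ifs <;> simp_all <;> omega

set_option maxRecDepth 4096 in
theorem loopA_spec (friends : List String) (gs : List String)
    (hg : ∀ g ∈ gs, ∃ s ∈ friends, ∃ r ∈ friends, s ≠ r ∧ PySem.Str.split? g " " = some [s, r])
    (gd : PySem.Dict String (PySem.Dict String Int)) (gv gt : PySem.Dict String Int)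
    (hkeys : gd.keys = PySem.Set.ofList friends)
    (hinner : ∀ a ∈ friends, (gd.getD a PySem.Dict.empty).keys
        = PySem.Set.ofList (friends.filter (fun j => decide (j ≠ a)))) :
    (gs.foldl stepA (gd, gv, gt)).1.keys = PySem.Set.ofList friends
    ∧ (∀ a ∈ friends, ((gs.foldl stepA (gd, gv, gt)).1.getD a PySem.Dict.empty).keys
        = PySem.Set.ofList (friends.filter (fun j => decide (j ≠ a))))
    ∧ (∀ a b, ((gs.foldl stepA (gd, gv, gt)).1.getD a PySem.Dict.empty).getD b 0
        = (gd.getD a PySem.Dict.empty).getD b 0 + cAB gs a b)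
    ∧ (∀ a, (gs.foldl stepA (gd, gv, gt)).2.1.getD a 0 = gv.getD a 0 + sentBy gs a)
    ∧ (∀ a, (gs.foldl stepA (gd, gv, gt)).2.2.getD a 0 = gt.getD a 0 + recvBy gs a) := by
  induction gs generalizing gd gv gt with
  | nil =>
      refine ⟨hkeys, hinner, fun a b => ?_, fun a => ?_, fun a => ?_⟩ <;>
        simp [cAB, sentBy, recvBy]
  | cons g t ih =>
      obtain ⟨s, hs, r, hr, hne, hsplit⟩ := hg g List.mem_cons_self
      simp only [List.foldl_cons, stepA, hsplit]
      have hcont : gd.contains s = true :=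
        (PySem.Dict.contains_iff_mem_keys gd s).2 (hkeys ▸ (PySem.Set.mem_ofList friends s).2 hs)
      have hkeys' : (gd.insert s ((gd.getD s PySem.Dict.empty).insert r
          ((gd.getD s PySem.Dict.empty).getD r 0 + 1))).keys = PySem.Set.ofList friends := by
        rw [PySem.Dict.keys_insert_of_contains _ _ hcont, hkeys]
      have hinner' : ∀ a ∈ friends,
          ((gd.insert s ((gd.getD s PySem.Dict.empty).insert r
            ((gd.getD s PySem.Dict.empty).getD r 0 + 1))).getD a PySem.Dict.empty).keys
          = PySem.Set.ofList (friends.filter (fun j => decide (j ≠ a))) := by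
        intro a ha
        rw [PySem.Dict.getD_insert]
        by_cases has : a = s
        · subst has
          rw [if_pos rfl]
          have hrk : (gd.getD a PySem.Dict.empty).contains r = true := by
            rw [PySem.Dict.contains_iff_mem_keys, hinner a ha, PySem.Set.mem_ofList]
            simp only [List.mem_filter]
            exact ⟨hr, by simpa using Ne.symm hne⟩
          rw [PySem.Dict.keys_insert_of_contains _ _ hrk]
          exact hinner a ha
        · rw [if_neg has]
          exact hinner a ha
      obtain ⟨k1, k2, k3, k4, k5⟩ :=
        ih (fun g hgm => hg g (List.mem_cons_of_mem _ hgm)) _ _ _ hkeys' hinner'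
      refine ⟨k1, k2, fun a b => ?_, fun a => ?_, fun a => ?_⟩
      · rw [k3, cAB_cons, hsplit, PySem.Dict.getD_insert]
        by_cases has : a = s
        · subst has
          rw [if_pos rfl, PySem.Dict.getD_insert]
          by_cases hbr : b = r
          · subst hbr
            rw [if_pos rfl, if_pos rfl]
            omega
          · have hc : ¬ ((some [a, r] : Option (List String)) = some [a, b]) := by
              simp only [Option.some.injEq, List.cons.injEq, and_true]
              exact fun h => hbr h.2.symm
            rw [if_neg hbr, if_neg hc]
            omega
        · have hc : ¬ ((some [s, r] : Option (List String)) = some [a, b]) := by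
            simp only [Option.some.injEq, List.cons.injEq, and_true]
            exact fun h => has h.1.symm
          rw [if_neg has, if_neg hc]
          omega
      · rw [k4, PySem.Dict.getD_insert, sentBy_cons, hsplit]
        by_cases has : a = s
        · subst has
          rw [if_pos rfl, if_pos (by simp)]
          omega
        · have hc : ¬ ((s == a) = true) := by
            simp only [beq_iff_eq]
            exact fun h => has h.symm
          rw [if_neg has, if_neg hc]
          omega
      · rw [k5, PySem.Dict.getD_insert, recvBy_cons, hsplit]
        by_cases har : a = r
        · subst har
          rw [if_pos rfl, if_pos (by simp)]
          omega
        · have hc : ¬ ((r == a) = true) := by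
            simp only [beq_iff_eq]
            exact fun h => har h.symm
          rw [if_neg har, if_neg hc]
          omega

theorem cntStep_eq (gifts : List String) (k kk : String) (cnt : Int) :
    (if cAB gifts k kk > cAB gifts kk k then cnt + 1
     else if cAB gifts k kk = cAB gifts kk k then
       (if sentBy gifts k - recvBy gifts k > sentBy gifts kk - recvBy gifts kk then cnt + 1 else cnt)
     else cnt)
    = if beatsB gifts k kk = true then cnt + 1 else cnt := by
  unfold beatsB
  split_ifs <;> simp_all <;> omega

theorem score_filter (gifts friends : List String) (k : String) :
    ((PySem.Set.ofList (friends.filter (fun j => decide (j ≠ k)))).countP (beatsB gifts k) : Int)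
      = score gifts (PySem.Set.ofList friends) k := by
  have hperm : (PySem.Set.ofList (friends.filter (fun j => decide (j ≠ k)))).Perm
      ((PySem.Set.ofList friends).filter (fun j => decide (j ≠ k))) := by
    apply (List.perm_ext_iff_of_nodup (PySem.Set.nodup_ofList _)
      ((PySem.Set.nodup_ofList friends).filter _)).2
    intro x
    simp [PySem.Set.mem_ofList, List.mem_filter]
  rw [hperm.countP_eq, List.countP_filter]
  unfold score
  congr 1
  apply List.countP_congr
  intro b _
  by_cases hbk : b = k
  · subst hbk
    simp [beatsB_irrefl]
  · simp [hbk]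

-- the heart of B's correctness: baseline + corrections = head-to-head score
theorem baseline_plus_delta (gifts : List String) (names : List String) (hnd : names.Nodup)
    (k : String) (hk : k ∈ names) :
    (names.countP (fun b => decide (netOf gifts b < netOf gifts k)) : Int)
      + ((names.flatMap (fun a => names.map (fun b => (a, b)))).map (delta gifts k)).sum
      = (names.countP (beatsB gifts k) : Int) := by
  rw [sum_pairs]
  have hinner : ∀ a ∈ names,
      (names.map (fun b => delta gifts k (a, b))).sum
        = (if cAB gifts a k > cAB gifts k a ∧ netOf gifts k > netOf gifts a then (-1 : Int) else 0)
          + (if a = k then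
              (names.map (fun b => if cAB gifts k b > cAB gifts b k then
                (1 : Int) - (if netOf gifts k > netOf gifts b then 1 else 0) else 0)).sum
            else 0) := by
    intro a ha
    by_cases hak : a = k
    · subst hak
      rw [if_pos rfl, List.map_congr_left (fun b _ => delta_self_left gifts a b),
        if_neg (by omega : ¬ (cAB gifts a a > cAB gifts a a ∧ netOf gifts a > netOf gifts a))]
      ring
    · rw [if_neg hak,
        sum_single names (fun b => delta gifts k (a, b)) k hnd hk
          (fun b _ hbk => delta_vanish_other gifts k a b hak hbk),
        delta_at_right gifts k a hak]
      split_ifs <;> norm_num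
  rw [List.map_congr_left hinner, PySem.List.sum_map_add_int,
    sum_single names _ k hnd hk (fun x _ hxk => if_neg hxk), if_pos rfl,
    ← PySem.List.sum_map_ite_one_zero (beatsB gifts k) names,
    ← PySem.List.sum_map_ite_one_zero (fun b => decide (netOf gifts b < netOf gifts k)) names,
    ← PySem.List.sum_map_add_int names
      (fun a => if cAB gifts a k > cAB gifts k a ∧ netOf gifts k > netOf gifts a then (-1 : Int) else 0)
      (fun b => if cAB gifts k b > cAB gifts b k then
        (1 : Int) - (if netOf gifts k > netOf gifts b then 1 else 0) else 0),
    ← PySem.List.sum_map_add_int names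
      (fun b => if decide (netOf gifts b < netOf gifts k) = true then (1 : Int) else 0) _]
  congr 1
  apply List.map_congr_left
  intro b _
  unfold beatsB netOf
  simp only [decide_eq_true_eq, Bool.or_eq_true, Bool.and_eq_true]
  split_ifs <;> omega

-- ===== VERDICT (by name: the statement is the Claim_ definition above) =====
theorem solution_spec : Claim_equal_solution := by
  unfold Claim_equal_solution
  intro friends gifts _ hpre
  unfold Spec_solution solution solution_alt
  dsimp only
  -- A-side characterisation
  obtain ⟨k1, k2, k3, k4, k5⟩ := loopA_spec friends gifts hpre
    (giftInit friends) (zeroInit friends) (zeroInit friends) (keys_giftInit friends)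
    (by intro a ha; rw [getD_giftInit, if_pos ha, keys_innerInit])
  have hA3 : ∀ a b, ((gifts.foldl stepA (giftInit friends, zeroInit friends, zeroInit friends)).1.getD
      a PySem.Dict.empty).getD b 0 = cAB gifts a b := by
    intro a b
    rw [k3 a b, getD2_giftInit]
    omega
  have hA4 : ∀ a, (gifts.foldl stepA (giftInit friends, zeroInit friends, zeroInit friends)).2.1.getD a 0
      = sentBy gifts a := by
    intro a
    rw [k4 a, getD_zeroInit]
    omega
  have hA5 : ∀ a, (gifts.foldl stepA (giftInit friends, zeroInit friends, zeroInit friends)).2.2.getD a 0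
      = recvBy gifts a := by
    intro a
    rw [k5 a, getD_zeroInit]
    omega
  -- B-side characterisation
  have hc : ∀ a b, (gifts.foldl stepB (PySem.Dict.empty, PySem.Dict.empty)).1.getD (a, b) 0
      = cAB gifts a b := by
    intro a b
    rw [(loopB_spec gifts PySem.Dict.empty PySem.Dict.empty).1]
    simp
  have hn : ∀ a, (gifts.foldl stepB (PySem.Dict.empty, PySem.Dict.empty)).2.getD a 0
      = netOf gifts a := by
    intro a
    rw [(loopB_spec gifts PySem.Dict.empty PySem.Dict.empty).2]
    simp [netOf]
  obtain ⟨hknd, hkmem0⟩ := loopB_keys gifts PySem.Dict.empty PySem.Dict.empty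
    PySem.Dict.nodup_keys_empty
  have hkmem : ∀ p : String × String,
      p ∈ (gifts.foldl stepB (PySem.Dict.empty, PySem.Dict.empty)).1.keys
        ↔ ∃ g ∈ gifts, PySem.Str.split? g " " = some [p.1, p.2] := by
    intro p
    rw [hkmem0 p]
    simp
  have hcomp : ∀ p ∈ (gifts.foldl stepB (PySem.Dict.empty, PySem.Dict.empty)).1.keys,
      p.1 ∈ friends ∧ p.2 ∈ friends := by
    intro p hp
    obtain ⟨g, hg, hs⟩ := (hkmem p).1 hp
    obtain ⟨sx, hsx, rx, hrx, -, hsg⟩ := hpre g hg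
    rw [hsg] at hs
    simp only [Option.some.injEq, List.cons.injEq, and_true] at hs
    exact ⟨hs.1 ▸ hsx, hs.2 ▸ hrx⟩
  have hdedup : PySem.List.dedup friends = PySem.Set.ofList friends := rfl
  rw [hdedup]
  have hnames : (PySem.Set.ofList friends).Nodup := PySem.Set.nodup_ofList friends
  -- wins0 lookups and keys
  have hw0getD : ∀ a, ((PySem.Set.ofList friends).foldl (fun d a =>
        d.insert a (((PySem.Set.ofList friends).countP (fun b =>
          (gifts.foldl stepB (PySem.Dict.empty, PySem.Dict.empty)).2.getD b 0
            < (gifts.foldl stepB (PySem.Dict.empty, PySem.Dict.empty)).2.getD a 0) : Int)))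
        PySem.Dict.empty).getD a 0
      = if a ∈ PySem.Set.ofList friends
          then (((PySem.Set.ofList friends).countP (fun b =>
            decide (netOf gifts b < netOf gifts a))) : Int) else 0 := by
    intro a
    rw [getD_foldl_insert_fn]
    split_ifs with ha
    · congr 1
      apply List.countP_congr
      intro b _
      rw [hn a, hn b]
    · simp
  have hw0keys : ((PySem.Set.ofList friends).foldl (fun d a =>
        d.insert a (((PySem.Set.ofList friends).countP (fun b =>
          (gifts.foldl stepB (PySem.Dict.empty, PySem.Dict.empty)).2.getD b 0
            < (gifts.foldl stepB (PySem.Dict.empty, PySem.Dict.empty)).2.getD a 0) : Int)))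
        PySem.Dict.empty).keys = PySem.Set.ofList friends := by
    rw [PySem.Dict.keys_foldl_insert]
    exact PySem.Set.ofList_eq_self_of_nodup _ hnames
  -- items facts
  have hv : ∀ kv ∈ (gifts.foldl stepB (PySem.Dict.empty, PySem.Dict.empty)).1.items,
      kv.2 = cAB gifts kv.1.1 kv.1.2 := by
    intro kv hkv
    rw [PySem.Dict.items_eq_map_keys _ hknd 0] at hkv
    obtain ⟨p, hp, rfl⟩ := List.mem_map.1 hkv
    obtain ⟨a, b⟩ := p
    exact hc a b
  -- final wins dict: keys and lookups
  have hwkeys : (((gifts.foldl stepB (PySem.Dict.empty, PySem.Dict.empty)).1.items).foldl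
      (corrStep (gifts.foldl stepB (PySem.Dict.empty, PySem.Dict.empty)).1
        (gifts.foldl stepB (PySem.Dict.empty, PySem.Dict.empty)).2) ((PySem.Set.ofList friends).foldl (fun d a =>
        d.insert a (((PySem.Set.ofList friends).countP (fun b =>
          (gifts.foldl stepB (PySem.Dict.empty, PySem.Dict.empty)).2.getD b 0
            < (gifts.foldl stepB (PySem.Dict.empty, PySem.Dict.empty)).2.getD a 0) : Int)))
        PySem.Dict.empty)).keys
      = PySem.Set.ofList friends := by
    rw [corrFold_keys _ _ _ _ ?_, hw0keys]
    intro kv hkv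
    have hm := PySem.Dict.mem_keys_of_mem_items _ hkv
    obtain ⟨hf1, hf2⟩ := hcomp kv.1 hm
    rw [hw0keys]
    exact ⟨(PySem.Set.mem_ofList friends _).2 hf1, (PySem.Set.mem_ofList friends _).2 hf2⟩
  have hwin : ∀ k ∈ PySem.Set.ofList friends,
      (((gifts.foldl stepB (PySem.Dict.empty, PySem.Dict.empty)).1.items).foldl
        (corrStep (gifts.foldl stepB (PySem.Dict.empty, PySem.Dict.empty)).1
          (gifts.foldl stepB (PySem.Dict.empty, PySem.Dict.empty)).2) ((PySem.Set.ofList friends).foldl (fun d a =>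
        d.insert a (((PySem.Set.ofList friends).countP (fun b =>
          (gifts.foldl stepB (PySem.Dict.empty, PySem.Dict.empty)).2.getD b 0
            < (gifts.foldl stepB (PySem.Dict.empty, PySem.Dict.empty)).2.getD a 0) : Int)))
        PySem.Dict.empty)).getD k 0
      = score gifts (PySem.Set.ofList friends) k := by
    intro k hk
    rw [corrFold_getD gifts _ _ hc hn _ hv _ k, hw0getD k, if_pos hk]
    have hitems : (((gifts.foldl stepB (PySem.Dict.empty, PySem.Dict.empty)).1.items).map
          (fun kv => delta gifts k kv.1)).sum
        = (((gifts.foldl stepB (PySem.Dict.empty, PySem.Dict.empty)).1.keys).map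
            (delta gifts k)).sum := by
      rw [PySem.Dict.items_eq_map_keys _ hknd 0, List.map_map]
      rfl
    have hsup : (((gifts.foldl stepB (PySem.Dict.empty, PySem.Dict.empty)).1.keys).map
          (delta gifts k)).sum
        = (((PySem.Set.ofList friends).flatMap (fun a =>
            (PySem.Set.ofList friends).map (fun b => (a, b)))).map (delta gifts k)).sum := by
      apply sum_superset _ _ _ hknd (nodup_pairs _ _ hnames hnames)
      · intro p hp
        obtain ⟨hf1, hf2⟩ := hcomp p hp
        exact (mem_pairs _ _ p).2
          ⟨(PySem.Set.mem_ofList friends _).2 hf1, (PySem.Set.mem_ofList friends _).2 hf2⟩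
      · intro p _ hnp
        apply delta_vanish_notmem
        have h0 : gifts.countP (fun g => PySem.Str.split? g " " == some [p.1, p.2]) = 0 :=
          List.countP_eq_zero.2 (fun g hg hbe =>
            hnp ((hkmem p).2 ⟨g, hg, by simpa using hbe⟩))
        simp [cAB, h0]
    rw [hitems, hsup, baseline_plus_delta gifts _ hnames k hk]
    rfl
  -- B's value: values → map of keys → map of score → running max
  rw [PySem.Dict.values_eq_map_keys _ (by rw [hwkeys]; exact hnames) 0, hwkeys,
    List.map_congr_left hwin,
    maxD_map_eq_foldl _ _ (fun a _ => by unfold score; positivity)]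
  -- A's value: items → map of keys → fold of score
  rw [PySem.Dict.items_eq_map_keys _ (by rw [k1]; exact PySem.Set.nodup_ofList friends) PySem.Dict.empty,
    List.foldl_map, k1]
  apply PySem.List.foldl_congr_mem
    (g := fun ans k => max ans (score gifts (PySem.Set.ofList friends) k))
  intro ans k hk
  have hkf : k ∈ friends := (PySem.Set.mem_ofList friends k).1 hk
  dsimp only
  rw [PySem.Dict.items_eq_map_keys _ (by rw [k2 k hkf]; exact PySem.Set.nodup_ofList _) 0,
    List.foldl_map, k2 k hkf]
  dsimp only
  simp only [hA3, hA4, hA5, cntStep_eq]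
  rw [PySem.List.foldl_if_add_one, zero_add, score_filter gifts friends k]
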